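-- pv_equiv track=rewrite | github.com/semk/leetcode | python/hard/sign_counts.py | FindSignatureCountsUF
-- ===== SOURCE A (Python) =====
-- class UF:
--
--     def __init__(self, size):
--         self.ids = list(range(size))
--         self.sizes = [1] * size
--
--     def union(self, a, b):
--         root_a = self.root(a)
--         root_b = self.root(b)
--         if root_a == root_b:
--             return
--         if self.sizes[root_a] > self.sizes[root_b]:
--             self.ids[root_b] = root_a
--             self.sizes[root_a] += self.sizes[root_b]
--         else:
--             self.ids[root_a] = root_b
--             self.sizes[root_b] += self.sizes[root_a]
--
--     def root(self, idx):
--         while self.ids[idx] != idx: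
--             self.ids[idx] = self.ids[self.ids[idx]]
--             idx = self.ids[idx]
--
--         return idx
--
--     def size(self, idx):
--         root = self.root(idx)
--         return self.sizes[root]
--
-- def FindSignatureCountsUF(bookHolders):
--     numStudents = len(bookHolders)
--     uf = UF(numStudents)
--     signCounts = []
--     for i in range(numStudents):
--         uf.union(i, bookHolders[i] - 1)
--
--     for i in range(numStudents):
--         signCounts.append(uf.size(i))
--
--     return signCounts
-- ===== SOURCE B (Python) =====
-- def FindSignatureCountsUF(bookHolders):
--     # Eager weighted quick-find: labels[x] is the component id of x,
--     # members[l] lists the nodes of the live component l; on each edge the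
--     # smaller component is relabelled into the larger one.
--     n = len(bookHolders)
--     labels = list(range(n))
--     members = [[i] for i in range(n)]
--     for i, b in enumerate(bookHolders):
--         la, lb = labels[i], labels[(b - 1) % n]
--         if la != lb:
--             if len(members[la]) > len(members[lb]):
--                 la, lb = lb, la
--             for x in members[la]:
--                 labels[x] = lb
--             members[lb].extend(members[la])
--             members[la] = []
--     return [len(members[labels[i]]) for i in range(n)]
-- ===== Notes on version B (the rewrite author's own statement) =====
-- stated objective: alternative
-- what changed: Replaces the lazy weighted quick-union with path halving (parent array, root chasing, link by size) by an eager weighted quick-find: a direct component-label array plus per-component member lists, relabelling the smaller component into the larger on each edge, so no trees and no root loops exist at all.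
import Mathlib
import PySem

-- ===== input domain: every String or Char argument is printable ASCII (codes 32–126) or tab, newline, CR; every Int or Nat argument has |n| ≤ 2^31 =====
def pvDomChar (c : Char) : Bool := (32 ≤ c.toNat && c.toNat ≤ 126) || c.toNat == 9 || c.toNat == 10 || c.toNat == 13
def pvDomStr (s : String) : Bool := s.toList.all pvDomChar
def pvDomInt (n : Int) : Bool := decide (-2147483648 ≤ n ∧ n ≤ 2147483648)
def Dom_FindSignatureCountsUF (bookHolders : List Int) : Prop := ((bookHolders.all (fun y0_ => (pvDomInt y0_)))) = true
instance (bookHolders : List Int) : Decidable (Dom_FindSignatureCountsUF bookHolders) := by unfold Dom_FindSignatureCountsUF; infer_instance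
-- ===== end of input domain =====

-- B replaces A's weighted quick-union with path halving by an eager weighted
-- quick-find (component-label array + member lists, smaller class relabelled);
-- same return value on all inputs where A does not raise.


-- ===== PORT A =====
-- UF.root: 'while ids[idx] != idx: ids[idx] = ids[ids[idx]]; idx = ids[idx]'.
-- The while loop gets a fuel guard (numStudents+1 always suffices); on fuel
-- exhaustion / IndexError (only outside Pre_) it returns the current state.
def ufRoot (ids : List Int) (idx : Int) : Nat → List Int × Int
  | 0 => (ids, idx)
  | fuel+1 =>
    match PySem.List.pyGet? ids idx with
    | none => (ids, idx)
    | some v =>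
      if v = idx then (ids, idx)
      else
        match PySem.List.pyGet? ids v with
        | none => (ids, idx)
        | some w => ufRoot (PySem.List.pySetD ids idx w) w fuel

-- UF.union on the state (ids, sizes)
def ufUnion (st : List Int × List Int) (a b : Int) (fuel : Nat) : List Int × List Int :=
  let r1 := ufRoot st.1 a fuel
  let r2 := ufRoot r1.1 b fuel
  if r1.2 = r2.2 then (r2.1, st.2)
  else
    let sa := PySem.List.pyGetD st.2 r1.2 0
    let sb := PySem.List.pyGetD st.2 r2.2 0
    if sa > sb then
      (PySem.List.pySetD r2.1 r2.2 r1.2, PySem.List.pySetD st.2 r1.2 (sa + sb))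
    else
      (PySem.List.pySetD r2.1 r1.2 r2.2, PySem.List.pySetD st.2 r2.2 (sb + sa))

def FindSignatureCountsUF (bookHolders : List Int) : List Int :=
  let numStudents := bookHolders.length
  let fuel := numStudents + 1
  let st := (List.range numStudents).foldl
      (fun (st : List Int × List Int) i =>
        ufUnion st (Int.ofNat i) (PySem.List.pyGetD bookHolders (Int.ofNat i) 0 - 1) fuel)
      ((List.range numStudents).map Int.ofNat, List.replicate numStudents (1 : Int))
  ((List.range numStudents).foldl
      (fun (acc : List Int × List Int) i =>
        let r := ufRoot acc.1 (Int.ofNat i) fuel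
        (r.1, acc.2 ++ [PySem.List.pyGetD st.2 r.2 0]))
      (st.1, ([] : List Int))).2

-- ===== PORT B =====
def qfStep (n : Nat) (st : List Int × List (List Int)) (ib : Int × Int) : List Int × List (List Int) :=
  let j := PySem.Int.mod (ib.2 - 1) (n : Int)
  let la := PySem.List.pyGetD st.1 ib.1 0
  let lb := PySem.List.pyGetD st.1 j 0
  if la = lb then st
  else
    let p := if (PySem.List.pyGetD st.2 la []).length > (PySem.List.pyGetD st.2 lb []).length
             then (lb, la) else (la, lb)
    let labels' := (PySem.List.pyGetD st.2 p.1 []).foldl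
        (fun ls x => PySem.List.pySetD ls x p.2) st.1
    let members' := PySem.List.pySetD
        (PySem.List.pySetD st.2 p.2
          ((PySem.List.pyGetD st.2 p.2 []) ++ (PySem.List.pyGetD st.2 p.1 [])))
        p.1 []
    (labels', members')

def FindSignatureCountsUF_alt (bookHolders : List Int) : List Int :=
  let n := bookHolders.length
  let st := (PySem.List.enumerate bookHolders 0).foldl (qfStep n)
      ((List.range n).map Int.ofNat, (List.range n).map (fun i => [(Int.ofNat i : Int)]))
  (List.range n).map (fun i =>
    ((PySem.List.pyGetD st.2 (PySem.List.pyGetD st.1 (Int.ofNat i) 0) []).length : Int))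

-- ===== PRECONDITION & SPEC =====
-- Pre_ excludes exactly the inputs on which A raises IndexError: some
-- bookHolders[i] - 1 outside [-n, n) as an index into the ids list.
def Pre_FindSignatureCountsUF (bookHolders : List Int) : Prop :=
  ∀ v ∈ bookHolders, 1 - (bookHolders.length : Int) ≤ v ∧ v ≤ (bookHolders.length : Int)
instance (bookHolders : List Int) : Decidable (Pre_FindSignatureCountsUF bookHolders) := by
  unfold Pre_FindSignatureCountsUF; infer_instance

def pvWitness_FindSignatureCountsUF : List Int := [2, 1, 3, -1]

def Spec_FindSignatureCountsUF (bookHolders : List Int) (out : List Int) : Prop := out = FindSignatureCountsUF_alt bookHolders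
instance (bookHolders : List Int) (out : List Int) : Decidable (Spec_FindSignatureCountsUF bookHolders out) := by unfold Spec_FindSignatureCountsUF; infer_instance

-- ===== CLAIM (what is proved, stated in full; the proofs are below) =====
def Claim_equal_FindSignatureCountsUF : Prop := ∀ (bookHolders : List Int), Dom_FindSignatureCountsUF bookHolders → Pre_FindSignatureCountsUF bookHolders → Spec_FindSignatureCountsUF bookHolders (FindSignatureCountsUF bookHolders)

-- ===== LEMMAS AND PROOFS =====

-- ---- the parent-function view of A's ids list ----
def pvP (ids : List Int) (x : Nat) : Nat := (ids.getD x 0).toNat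
def pvRoot (n : Nat) (ids : List Int) (x : Nat) : Nat := (pvP ids)^[n] x
def pvRG (n : Nat) (ids : List Int) : Prop :=
  ids.length = n ∧ ∀ x, x < n → 0 ≤ ids.getD x 0 ∧ (ids.getD x 0).toNat < n
def pvAC (n k : Nat) (ids : List Int) : Prop :=
  ∀ x, x < n → pvP ids ((pvP ids)^[k] x) = (pvP ids)^[k] x
def pvCard (n : Nat) (ids : List Int) (x : Nat) : Nat :=
  (List.range n).countP (fun y => pvRoot n ids y == pvRoot n ids x)

-- ---- the invariant coupling A's state with B's state ----
def pvLB (n : Nat) (labels : List Int) : Prop :=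
  labels.length = n ∧ ∀ x, x < n → 0 ≤ labels.getD x 0 ∧ (labels.getD x 0).toNat < n
def pvMEM (n : Nat) (labels : List Int) (members : List (List Int)) : Prop :=
  members.length = n ∧ ∀ l, l < n → (members.getD l []).Nodup ∧
    ∀ z : Int, z ∈ members.getD l [] ↔ ∃ x, x < n ∧ z = (x : Int) ∧ labels.getD x 0 = (l : Int)
def pvCP (n : Nat) (ids labels : List Int) : Prop :=
  ∀ x, x < n → ∀ y, y < n → (pvRoot n ids x = pvRoot n ids y ↔ labels.getD x 0 = labels.getD y 0)
def pvINV (n k : Nat) (st : List Int × List Int) (bst : List Int × List (List Int)) : Prop :=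
  pvRG n st.1 ∧ pvAC n k st.1 ∧ st.2.length = n ∧
  (∀ x, x < n → st.2.getD (pvRoot n st.1 x) 0 = (pvCard n st.1 x : Int)) ∧
  pvLB n bst.1 ∧ pvMEM n bst.1 bst.2 ∧ pvCP n st.1 bst.1

-- ---- generic facts about iterating a parent function ----
theorem pvIterStable (p : Nat → Nat) (x : Nat) {k m : Nat} (hk : k ≤ m)
    (hfix : p (p^[k] x) = p^[k] x) : p^[m] x = p^[k] x := by
  have : m = (m - k) + k := by omega
  rw [this, Function.iterate_add_apply, Function.iterate_fixed hfix]


theorem pvChainSkip (p : Nat → Nat) (a : Nat) :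
    ∀ (m x : Nat), ∃ m', m ≤ m' ∧ (Function.update p a (p (p a)))^[m] x = p^[m'] x := by
  intro m
  induction m with
  | zero => intro x; exact ⟨0, le_rfl, rfl⟩
  | succ m ih =>
    intro x
    obtain ⟨m', hm', he⟩ := ih x
    rw [Function.iterate_succ_apply', he]
    by_cases hax : p^[m'] x = a
    · refine ⟨m' + 2, by omega, ?_⟩
      rw [hax, Function.update_self]
      have : p^[m'+2] x = p (p (p^[m'] x)) := by
        rw [show m' + 2 = 2 + m' by omega, Function.iterate_add_apply]; rfl
      rw [this, hax]
    · refine ⟨m' + 1, by omega, ?_⟩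
      rw [Function.update_of_ne hax, Function.iterate_succ_apply']


theorem pvHalve (n k : Nat) (p : Nat → Nat) (a : Nat) (hna : p a ≠ a)
    (hAC : ∀ x, x < n → p (p^[k] x) = p^[k] x) (hkn : k ≤ n) :
    (∀ x, x < n →
        (Function.update p a (p (p a))) ((Function.update p a (p (p a)))^[k] x)
          = (Function.update p a (p (p a)))^[k] x) ∧
    (∀ x, x < n → (Function.update p a (p (p a)))^[n] x = p^[n] x) := by
  constructor
  · intro x hx
    obtain ⟨m', hm', he⟩ := pvChainSkip p a k x
    rw [he, pvIterStable p x hm' (hAC x hx)]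
    have hfix := hAC x hx
    have hne : p^[k] x ≠ a := fun h => hna (by rw [← h, hfix])
    rw [Function.update_of_ne hne, hfix]
  · intro x hx
    obtain ⟨m', hm', he⟩ := pvChainSkip p a n x
    rw [he]
    have h1 : p^[m'] x = p^[k] x := pvIterStable p x (le_trans hkn hm') (hAC x hx)
    have h2 : p^[n] x = p^[k] x := pvIterStable p x hkn (hAC x hx)
    rw [h1, h2]


theorem pvLink (n k : Nat) (p : Nat → Nat) (ra rb : Nat) (hra : p ra = ra) (hrb : p rb = rb)
    (hne : ra ≠ rb) (hAC : ∀ x, x < n → p (p^[k] x) = p^[k] x) (hk1 : k + 1 ≤ n) :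
    (∀ x, x < n →
        (Function.update p ra rb) ((Function.update p ra rb)^[k+1] x)
          = (Function.update p ra rb)^[k+1] x) ∧
    (∀ x, x < n → (Function.update p ra rb)^[n] x = if p^[n] x = ra then rb else p^[n] x) := by
  set p' := Function.update p ra rb with hp'
  have hp'rb : p' rb = rb := by rw [hp', Function.update_of_ne (Ne.symm hne), hrb]
  have hp'ra : p' ra = rb := by rw [hp', Function.update_self]
  -- key: for x < n, p'^[k+1] x = (if p^[k] x = ra then rb else p^[k] x), a p'-fixpoint
  have key : ∀ x, x < n → p'^[k+1] x = if p^[k] x = ra then rb else p^[k] x := by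
    intro x hx
    have hfix := hAC x hx
    by_cases hcase : p^[k] x = ra
    · -- disjunction claim
      have disj : ∀ m, m ≤ k → p'^[m] x = p^[m] x ∨ p'^[m] x = rb := by
        intro m
        induction m with
        | zero => intro _; exact Or.inl rfl
        | succ m ihm =>
          intro hm
          rcases ihm (by omega) with hl | hr
          · by_cases hma : p^[m] x = ra
            · right
              rw [Function.iterate_succ_apply', hl, hma, hp'ra]
            · left
              rw [Function.iterate_succ_apply', hl, hp', Function.update_of_ne hma,
                Function.iterate_succ_apply']
          · right; rw [Function.iterate_succ_apply', hr, hp'rb]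
      have : p'^[k+1] x = rb := by
        rcases disj k le_rfl with hl | hr
        · rw [Function.iterate_succ_apply', hl, hcase, hp'ra]
        · rw [Function.iterate_succ_apply', hr, hp'rb]
      rw [this, if_pos hcase]
    · -- the p-chain never meets ra
      have never : ∀ m, p^[m] x ≠ ra := by
        intro m hm
        by_cases hmk : m ≤ k
        · have : p^[k] x = ra := by
            have : p^[k] x = p^[k - m] (p^[m] x) := by
              rw [← Function.iterate_add_apply]; congr 1; omega
            rw [this, hm, Function.iterate_fixed hra]
          exact hcase this
        · have : p^[m] x = p^[k] x := pvIterStable p x (by omega) (hAC x hx)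
          exact hcase (this ▸ hm)
      have same : ∀ m, p'^[m] x = p^[m] x := by
        intro m
        induction m with
        | zero => rfl
        | succ m ihm =>
          rw [Function.iterate_succ_apply', ihm, hp', Function.update_of_ne (never m),
            Function.iterate_succ_apply']
      rw [same (k+1), if_neg hcase]
      calc p^[k+1] x = p (p^[k] x) := Function.iterate_succ_apply' p k x
        _ = p^[k] x := hfix
  constructor
  · intro x hx
    rw [key x hx]
    by_cases hcase : p^[k] x = ra
    · rw [if_pos hcase, hp'rb]
    · rw [if_neg hcase, hp', Function.update_of_ne hcase, hAC x hx]
  · intro x hx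
    have hfix' : p' (p'^[k+1] x) = p'^[k+1] x := by
      rw [key x hx]
      by_cases hcase : p^[k] x = ra
      · rw [if_pos hcase, hp'rb]
      · rw [if_neg hcase, hp', Function.update_of_ne hcase, hAC x hx]
    have h1 : p'^[n] x = p'^[k+1] x := pvIterStable p' x hk1 hfix'
    have h2 : p^[n] x = p^[k] x := pvIterStable p x (by omega) (hAC x hx)
    rw [h1, key x hx, h2]

theorem pvGetDSet (l : List Int) (i : Nat) (hi : i < l.length) (v : Int) (x : Nat) :
    (l.set i v).getD x 0 = if x = i then v else l.getD x 0 := by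
  by_cases h : x = i
  · subst h; simp [List.getD, List.getElem?_set, hi]
  · simp [List.getD, List.getElem?_set, h, Ne.symm h]


theorem pvP_set (ids : List Int) (a : Nat) (ha : a < ids.length) (v : Int) (_hv : 0 ≤ v) :
    pvP (ids.set a v) = Function.update (pvP ids) a v.toNat := by
  funext y
  show ((ids.set a v).getD y 0).toNat = _
  rw [pvGetDSet ids a ha v y]
  by_cases h : y = a
  · rw [if_pos h, h, Function.update_self]
  · rw [if_neg h, Function.update_of_ne h]; rfl


theorem pvRootFix (n k : Nat) (ids : List Int) (hAC : pvAC n k ids) (hkn : k ≤ n)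
    (x : Nat) (hx : x < n) : pvP ids (pvRoot n ids x) = pvRoot n ids x := by
  unfold pvRoot
  rw [pvIterStable (pvP ids) x hkn (hAC x hx)]
  exact hAC x hx

theorem pvRoot_p (n k : Nat) (ids : List Int) (hAC : pvAC n k ids) (hkn : k ≤ n)
    (x : Nat) (hx : x < n) : pvRoot n ids (pvP ids x) = pvRoot n ids x := by
  unfold pvRoot
  rw [← Function.iterate_succ_apply, Function.iterate_succ_apply']
  exact pvRootFix n k ids hAC hkn x hx

-- ---- specification of the ported UF.root ----
-- reading / stepping the ported root loop
theorem pvGetSome (ids : List Int) (x : Nat) (hx : x < ids.length) :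
    PySem.List.pyGet? ids ((x : Nat) : Int) = some (ids.getD x 0) := by
  rw [PySem.List.pyGet?_natCast, List.getElem?_eq_getElem hx]
  simp [List.getD, List.getElem?_eq_getElem hx]

theorem pvUfRootExit (ids : List Int) (x : Nat) (hx : x < ids.length) (f : Nat)
    (h0 : 0 ≤ ids.getD x 0) (hfix : pvP ids x = x) :
    ufRoot ids ((x : Nat) : Int) (f + 1) = (ids, ((x : Nat) : Int)) := by
  have hval : ids.getD x 0 = ((x : Nat) : Int) := by
    have h := Int.toNat_of_nonneg h0
    calc ids.getD x 0 = ((pvP ids x : Nat) : Int) := h.symm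
      _ = ((x : Nat) : Int) := by rw [hfix]
  simp only [ufRoot, pvGetSome ids x hx, hval]
  simp

theorem pvUfRootStep (ids : List Int) (x : Nat) (f : Nat) (hx : x < ids.length)
    (h0 : 0 ≤ ids.getD x 0) (hpxl : pvP ids x < ids.length) (hne : pvP ids x ≠ x) :
    ufRoot ids ((x : Nat) : Int) (f + 1)
      = ufRoot (ids.set x (ids.getD (pvP ids x) 0)) (ids.getD (pvP ids x) 0) f := by
  have hval : ids.getD x 0 = ((pvP ids x : Nat) : Int) := by
    show ids.getD x 0 = ((ids.getD x 0).toNat : Int)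
    exact (Int.toNat_of_nonneg h0).symm
  have hcast : ((pvP ids x : Nat) : Int) ≠ ((x : Nat) : Int) := by exact_mod_cast hne
  simp only [ufRoot, pvGetSome ids x hx, hval,
    pvGetSome ids (pvP ids x) hpxl]
  rw [if_neg hcast, PySem.List.pySetD_natCast]

theorem pvRootSpec (n : Nat) : ∀ (d fuel : Nat) (ids : List Int) (x : Nat), d < fuel → x < n →
    pvRG n ids → pvP ids ((pvP ids)^[d] x) = (pvP ids)^[d] x →
    ∀ k, k ≤ n → pvAC n k ids →
    ∃ ids', ufRoot ids (x : Int) fuel = (ids', ((pvRoot n ids x : Nat) : Int)) ∧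
      pvRG n ids' ∧ pvAC n k ids' ∧ (∀ y, y < n → pvRoot n ids' y = pvRoot n ids y) := by
  intro d
  induction d with
  | zero =>
    intro fuel ids x hdf hx hRG hfix k hk hAC
    simp only [Function.iterate_zero, id] at hfix
    obtain ⟨f, rfl⟩ : ∃ f, fuel = f + 1 := ⟨fuel - 1, by omega⟩
    refine ⟨ids, ?_, hRG, hAC, fun y _ => rfl⟩
    rw [pvUfRootExit ids x (hRG.1 ▸ hx) f (hRG.2 x hx).1 hfix]
    unfold pvRoot; rw [Function.iterate_fixed hfix]
  | succ d ih =>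
    intro fuel ids x hdf hx hRG hfix k hk hAC
    obtain ⟨f, rfl⟩ : ∃ f, fuel = f + 1 := ⟨fuel - 1, by omega⟩
    by_cases hxx : pvP ids x = x
    · refine ⟨ids, ?_, hRG, hAC, fun y _ => rfl⟩
      rw [pvUfRootExit ids x (hRG.1 ▸ hx) f (hRG.2 x hx).1 hxx]
      unfold pvRoot; rw [Function.iterate_fixed hxx]
    · -- one halving step
      have hxl : x < ids.length := hRG.1 ▸ hx
      have hv0 : 0 ≤ ids.getD x 0 := (hRG.2 x hx).1
      have hpxn : pvP ids x < n := (hRG.2 x hx).2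
      have hpxl : pvP ids x < ids.length := hRG.1 ▸ hpxn
      have hw0 : 0 ≤ ids.getD (pvP ids x) 0 := (hRG.2 _ hpxn).1
      have hppxn : pvP ids (pvP ids x) < n := (hRG.2 _ hpxn).2
      set p := pvP ids with hp
      set w : Int := ids.getD (pvP ids x) 0 with hwdef
      have hwval : w = ((p (p x) : Nat) : Int) := by
        rw [hwdef, hp]; exact (Int.toNat_of_nonneg hw0).symm
      have hstep : ufRoot ids (x : Int) (f + 1) = ufRoot (ids.set x w) w f :=
        pvUfRootStep ids x f hxl hv0 hpxl hxx
      set ids2 := ids.set x w with hids2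
      have hP2 : pvP ids2 = Function.update p x (p (p x)) := by
        rw [hids2, pvP_set ids x hxl w hw0, hwval, ← hp]; simp
      have hRG2 : pvRG n ids2 := by
        refine ⟨by rw [hids2, List.length_set, hRG.1], fun y hy => ?_⟩
        rw [hids2, pvGetDSet ids x hxl w y]
        by_cases hyx : y = x
        · rw [if_pos hyx, hwval]; constructor
          · positivity
          · simpa using hppxn
        · rw [if_neg hyx]; exact hRG.2 y hy
      obtain ⟨hAC2, hRoots2⟩ := pvHalve n k p x hxx hAC hk
      rw [← hP2] at hAC2 hRoots2
      -- the new start node and its fixpoint bound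
      have hfix2 : pvP ids2 ((pvP ids2)^[d] (p (p x))) = (pvP ids2)^[d] (p (p x)) := by
        rw [hP2]
        by_cases hc : p (p x) = p x
        · -- p x is already a fixpoint of p
          have hfix0 : Function.update p x (p (p x)) (p (p x)) = p (p x) := by
            rw [Function.update_of_ne (by rw [hc]; exact hxx), hc, hc]
          rw [Function.iterate_fixed hfix0]
          exact hfix0
        · have hd1 : 1 ≤ d := by
            rcases Nat.eq_zero_or_pos d with h0 | h1
            · exfalso; apply hc
              simpa [h0] using hfix
            · exact h1
          have hfixw : p (p^[d-1] (p (p x))) = p^[d-1] (p (p x)) := by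
            have : p^[d-1] (p (p x)) = p^[d+1] x := by
              rw [show p (p x) = p^[2] x by simp [Function.iterate_succ_apply'],
                ← Function.iterate_add_apply]
              congr 1; omega
            rw [this]; exact hfix
          obtain ⟨m', hm', he⟩ := pvChainSkip p x d (p (p x))
          rw [he, pvIterStable p (p (p x)) (by omega : d - 1 ≤ m') hfixw]
          have hrne : p^[d-1] (p (p x)) ≠ x := fun h => hxx (by rw [← h, hfixw])
          rw [Function.update_of_ne hrne, hfixw]
      obtain ⟨ids', hrun, hRG', hAC', hRoots'⟩ :=
        ih f ids2 (p (p x)) (by omega) hppxn hRG2 hfix2 k hk hAC2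
      rw [← hwval] at hrun
      refine ⟨ids', ?_, hRG', hAC', ?_⟩
      · rw [hstep, hrun]
        congr 2
        have hr2 : pvRoot n ids2 (p (p x)) = pvRoot n ids (p (p x)) := by
          show (pvP ids2)^[n] (p (p x)) = (pvP ids)^[n] (p (p x))
          rw [← hp]; exact hRoots2 _ hppxn
        rw [hr2, hp]
        rw [pvRoot_p n k ids hAC hk _ hpxn, pvRoot_p n k ids hAC hk x hx]
      · intro y hy
        rw [hRoots' y hy]
        show (pvP ids2)^[n] y = (pvP ids)^[n] y
        rw [← hp]; exact hRoots2 y hy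

theorem pvSetDNeg (l : List Int) (i : Int) (v : Int) (h1 : -(l.length:Int) ≤ i) (h2 : i < 0) :
    PySem.List.pySetD l i v = l.set (l.length - (-i).toNat) v := by
  have hnot : ¬ 0 ≤ i := by omega
  simp [PySem.List.pySetD, PySem.List.pySet?, PySem.List.pyIdx?, hnot, h1]

theorem pvRootCall (n k : Nat) (ids : List Int) (idx : Int) (hlo : -(n:Int) ≤ idx)
    (hhi : idx < n) (hRG : pvRG n ids) (hk : k ≤ n) (hAC : pvAC n k ids) :
    ∃ ids', ufRoot ids idx (n+1) =
        (ids', ((pvRoot n ids (PySem.Int.mod idx (n:Int)).toNat : Nat) : Int)) ∧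
      pvRG n ids' ∧ pvAC n k ids' ∧ (∀ y, y < n → pvRoot n ids' y = pvRoot n ids y) := by
  by_cases hpos : 0 ≤ idx
  · have hn : 0 < (n:Int) := by omega
    have hmod : PySem.Int.mod idx (n:Int) = idx := by
      rw [PySem.Int.mod_eq_emod_of_pos hn]
      exact Int.emod_eq_of_lt hpos hhi
    have hxn : idx.toNat < n := by omega
    have hidx : idx = ((idx.toNat : Nat) : Int) := by omega
    rw [hmod, hidx]
    exact pvRootSpec n k (n+1) ids idx.toNat (by omega) hxn hRG (hAC _ hxn) k hk hAC
  · -- negative index: one manual loop iteration, then the non-negative case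
    have hn : 0 < n := by
      by_contra h
      have : (n : Int) = 0 := by omega
      omega
    have hnI : 0 < (n:Int) := by exact_mod_cast hn
    have hlen : ids.length = n := hRG.1
    set a : Nat := ((n:Int) + idx).toNat with hadef
    have han : a < n := by omega
    have hal : a < ids.length := hRG.1 ▸ han
    have hmodv : idx % (n:Int) = idx + n := by
      have h3 : (idx + n) % (n:Int) = idx + n := Int.emod_eq_of_lt (by omega) (by omega)
      calc idx % (n:Int) = (idx + (n:Int) * 1) % (n:Int) :=
            (Int.add_mul_emod_self_left idx (n:Int) 1).symm
        _ = (idx + n) % (n:Int) := by ring_nf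
        _ = idx + n := h3
    have hmod : (PySem.Int.mod idx (n:Int)).toNat = a := by
      rw [PySem.Int.mod_eq_emod_of_pos hnI, hmodv]
      omega
    have hk' : 0 < (-idx).toNat ∧ (-idx).toNat ≤ ids.length := by
      constructor <;> omega
    have hidxeq : idx = -(((-idx).toNat : Nat) : Int) := by omega
    have haeq : ids.length - (-idx).toNat = a := by omega
    -- first read
    have hget1 : PySem.List.pyGet? ids idx = some (ids.getD a 0) := by
      rw [hidxeq, PySem.List.pyGet?_neg_natCast ids ((-idx).toNat) hk'.1 hk'.2, haeq,
        List.getElem?_eq_getElem hal]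
      simp [List.getD, List.getElem?_eq_getElem hal]
    have hv0 : 0 ≤ ids.getD a 0 := (hRG.2 a han).1
    have hvne : ids.getD a 0 ≠ idx := by omega
    have hpan : pvP ids a < n := (hRG.2 a han).2
    have hpal : pvP ids a < ids.length := hRG.1 ▸ hpan
    have hval : ids.getD a 0 = ((pvP ids a : Nat) : Int) := by
      show _ = ((ids.getD a 0).toNat : Int)
      exact (Int.toNat_of_nonneg hv0).symm
    have hw0 : 0 ≤ ids.getD (pvP ids a) 0 := (hRG.2 _ hpan).1
    have hppan : pvP ids (pvP ids a) < n := (hRG.2 _ hpan).2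
    set w : Int := ids.getD (pvP ids a) 0 with hwdef
    have hwval : w = ((pvP ids (pvP ids a) : Nat) : Int) := by
      show _ = ((ids.getD (pvP ids a) 0).toNat : Int)
      exact (Int.toNat_of_nonneg hw0).symm
    -- unfold one iteration of the while loop
    have hstep : ufRoot ids idx (n+1) = ufRoot (ids.set a w) w n := by
      show (match PySem.List.pyGet? ids idx with
        | none => (ids, idx)
        | some v =>
          if v = idx then (ids, idx)
          else
            match PySem.List.pyGet? ids v with
            | none => (ids, idx)
            | some w => ufRoot (PySem.List.pySetD ids idx w) w n) = _
      rw [hget1]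
      simp only [if_neg hvne]
      rw [hval, pvGetSome ids (pvP ids a) hpal]
      show ufRoot (PySem.List.pySetD ids idx w) w n = _
      rw [hidxeq, pvSetDNeg ids _ w (by omega) (by omega)]
      simp only [neg_neg, Int.toNat_natCast]
      rw [haeq]
    set ids2 := ids.set a w with hids2
    set p := pvP ids with hp
    have hP2 : pvP ids2 = Function.update p a (p (p a)) := by
      rw [hids2, pvP_set ids a hal w hw0, hwval, ← hp]; simp
    have hRG2 : pvRG n ids2 := by
      refine ⟨by rw [hids2, List.length_set, hRG.1], fun y hy => ?_⟩
      rw [hids2, pvGetDSet ids a hal w y]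
      by_cases hya : y = a
      · rw [if_pos hya, hwval]
        constructor
        · positivity
        · simpa using hppan
      · rw [if_neg hya]; exact hRG.2 y hy
    by_cases hfa : p a = a
    · -- a is already a root; the write is the identity and the next iteration exits
      have hpp : p (p a) = a := by rw [hfa, hfa]
      have hP2' : pvP ids2 = p := by
        rw [hP2, hpp]
        funext y
        by_cases hy : y = a
        · rw [hy, Function.update_self, hfa]
        · rw [Function.update_of_ne hy]
      have hAC2 : pvAC n k ids2 := by unfold pvAC; rw [hP2']; exact hAC
      have hfix2 : pvP ids2 ((pvP ids2)^[0] a) = (pvP ids2)^[0] a := by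
        rw [hP2']; simpa using hfa
      obtain ⟨ids', hrun, hRG', hAC', hRoots'⟩ :=
        pvRootSpec n 0 n ids2 a (by omega) han hRG2 hfix2 k hk hAC2
      rw [hwval, hpp] at hstep
      refine ⟨ids', ?_, hRG', hAC', ?_⟩
      · rw [hstep, hrun, hmod]
        congr 2
        have hr1 : pvRoot n ids2 a = pvRoot n ids a := by
          show (pvP ids2)^[n] a = (pvP ids)^[n] a
          rw [hP2', hp]
        rw [hr1]
      · intro y hy
        rw [hRoots' y hy]
        show (pvP ids2)^[n] y = (pvP ids)^[n] y
        rw [hP2', hp]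
    · -- genuine halving step at a, then the non-negative machinery
      obtain ⟨hAC2, hRoots2⟩ := pvHalve n k p a hfa hAC hk
      rw [← hP2] at hAC2 hRoots2
      have hk1 : 1 ≤ k := by
        by_contra h
        have h0 : k = 0 := by omega
        have := hAC a han
        rw [h0] at this
        simp at this
        exact hfa this
      have hfix2 : pvP ids2 ((pvP ids2)^[k-1] (p (p a))) = (pvP ids2)^[k-1] (p (p a)) := by
        rw [hP2]
        by_cases hc : p (p a) = p a
        · have hfix0 : Function.update p a (p (p a)) (p (p a)) = p (p a) := by
            rw [Function.update_of_ne (by rw [hc]; exact hfa), hc, hc]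
          rw [Function.iterate_fixed hfix0]
          exact hfix0
        · have hd1 : 2 ≤ k := by
            rcases Nat.lt_or_ge k 2 with h2 | h2
            · exfalso; apply hc
              have h1 : k = 1 := by omega
              have := hAC a han
              rw [h1] at this
              simpa using this
            · exact h2
          have hfixw : p (p^[k-2] (p (p a))) = p^[k-2] (p (p a)) := by
            have : p^[k-2] (p (p a)) = p^[k] a := by
              rw [show p (p a) = p^[2] a by simp [Function.iterate_succ_apply'],
                ← Function.iterate_add_apply]
              congr 1; omega
            rw [this]; exact hAC a han
          obtain ⟨m', hm', he⟩ := pvChainSkip p a (k-1) (p (p a))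
          rw [he, pvIterStable p (p (p a)) (by omega : k - 2 ≤ m') hfixw]
          have hrne : p^[k-2] (p (p a)) ≠ a := fun h => hfa (by rw [← h, hfixw])
          rw [Function.update_of_ne hrne, hfixw]
      obtain ⟨ids', hrun, hRG', hAC', hRoots'⟩ :=
        pvRootSpec n (k-1) n ids2 (p (p a)) (by omega) hppan hRG2 hfix2 k hk hAC2
      rw [← hwval] at hrun
      refine ⟨ids', ?_, hRG', hAC', ?_⟩
      · rw [hstep, hrun, hmod]
        congr 2
        have hr2 : pvRoot n ids2 (p (p a)) = pvRoot n ids (p (p a)) := by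
          show (pvP ids2)^[n] (p (p a)) = (pvP ids)^[n] (p (p a))
          rw [← hp]; exact hRoots2 _ hppan
        rw [hr2, hp]
        rw [pvRoot_p n k ids hAC hk _ hpan, pvRoot_p n k ids hAC hk a han]
      · intro y hy
        rw [hRoots' y hy]
        show (pvP ids2)^[n] y = (pvP ids)^[n] y
        rw [← hp]; exact hRoots2 y hy

-- ---- counting helpers ----
theorem pvCountSplit (p q : Nat → Bool) (l : List Nat) (h : ∀ a ∈ l, ¬(p a = true ∧ q a = true)) :
    l.countP (fun a => p a || q a) = l.countP p + l.countP q := by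
  induction l with
  | nil => simp
  | cons a t ih =>
    have ha := h a (by simp)
    have iht := ih (fun b hb => h b (by simp [hb]))
    simp only [List.countP_cons, iht]
    rcases Bool.eq_false_or_eq_true (p a) with hp | hp <;>
      rcases Bool.eq_false_or_eq_true (q a) with hq | hq <;>
      simp [hp, hq] at ha ⊢ <;> omega

-- length of a member list = size of the class
theorem pvLenMem (n : Nat) (ids labels : List Int) (members : List (List Int))
    (hLB : pvLB n labels) (hMEM : pvMEM n labels members) (hCP : pvCP n ids labels)
    (x : Nat) (hx : x < n) :
    (members.getD (labels.getD x 0).toNat []).length = pvCard n ids x := by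
  set lx := (labels.getD x 0).toNat with hlx
  have hlxn : lx < n := (hLB.2 x hx).2
  have hlcast : labels.getD x 0 = (lx : Int) := (Int.toNat_of_nonneg (hLB.2 x hx).1).symm
  obtain ⟨hnd, hmem⟩ := hMEM.2 lx hlxn
  set F : List Int := List.map (fun y : Nat => (y : Int))
      ((List.range n).filter (fun y => pvRoot n ids y == pvRoot n ids x)) with hF
  have hFnd : F.Nodup := by
    refine List.Nodup.map (fun a b hab => by exact_mod_cast hab) ?_
    exact (List.nodup_range).filter _
  have hsame : ∀ z : Int, z ∈ members.getD lx [] ↔ z ∈ F := by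
    intro z
    rw [hmem z, hF]
    simp only [List.mem_map, List.mem_filter, List.mem_range, beq_iff_eq]
    constructor
    · rintro ⟨y, hy, rfl, hl⟩
      refine ⟨y, ⟨hy, ?_⟩, rfl⟩
      rw [hCP y hy x hx, hl, hlcast]
    · rintro ⟨y, ⟨hy, hr⟩, rfl⟩
      refine ⟨y, hy, rfl, ?_⟩
      rw [← hlcast, ← hCP y hy x hx]; exact hr
  have hperm := (List.perm_ext_iff_of_nodup hnd hFnd).2 hsame
  rw [hperm.length_eq, hF, List.length_map, pvCard, List.countP_eq_length_filter]

-- relabelling loop of B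
theorem pvRelabel (n : Nat) (lnew : Int) :
    ∀ (L : List Int) (labels : List Int), (∀ z ∈ L, ∃ xz, xz < n ∧ z = (xz : Int)) →
    labels.length = n →
    (L.foldl (fun ls x => PySem.List.pySetD ls x lnew) labels).length = n ∧
    ∀ x, x < n → (L.foldl (fun ls x => PySem.List.pySetD ls x lnew) labels).getD x 0
      = if (x : Int) ∈ L then lnew else labels.getD x 0 := by
  intro L
  induction L with
  | nil => intro labels _ hlen; exact ⟨hlen, fun x _ => by simp⟩
  | cons z T ih =>
    intro labels hzs hlen
    obtain ⟨xz, hxzn, rfl⟩ := hzs z (by simp)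
    have hset : PySem.List.pySetD labels ((xz : Nat) : Int) lnew = labels.set xz lnew := by
      rw [PySem.List.pySetD_natCast]
    have hlen2 : (labels.set xz lnew).length = n := by rw [List.length_set, hlen]
    obtain ⟨ihl, ihg⟩ := ih (labels.set xz lnew) (fun z hz => hzs z (by simp [hz])) hlen2
    constructor
    · simpa [hset] using ihl
    · intro x hxn
      have := ihg x hxn
      rw [List.foldl_cons, hset, this, pvGetDSet labels xz (hlen ▸ hxzn) lnew x]
      by_cases hT : (x : Int) ∈ T
      · simp [hT]
      · by_cases hxz : x = xz
        · subst hxz; simp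
        · have : ((x : Nat) : Int) ≠ ((xz : Nat) : Int) := by exact_mod_cast hxz
          simp [hT, hxz, this]

-- ---- one merge, both sides ----
theorem pvGetDSetL (l : List (List Int)) (i : Nat) (hi : i < l.length) (v : List Int) (x : Nat) :
    (l.set i v).getD x [] = if x = i then v else l.getD x [] := by
  by_cases h : x = i
  · subst h; simp [List.getD, List.getElem?_set, hi]
  · simp [List.getD, List.getElem?_set, h, Ne.symm h]

theorem pvIterLt (n : Nat) (p : Nat → Nat) (hp : ∀ x, x < n → p x < n) :
    ∀ (m x : Nat), x < n → p^[m] x < n := by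
  intro m
  induction m with
  | zero => intro x hx; simpa using hx
  | succ m ih => intro x hx; rw [Function.iterate_succ_apply]; exact ih (p x) (hp x hx)

theorem pvRootLt (n : Nat) (ids : List Int) (hRG : pvRG n ids) (x : Nat) (hx : x < n) :
    pvRoot n ids x < n :=
  pvIterLt n (pvP ids) (fun y hy => (hRG.2 y hy).2) n x hx

theorem pvACsucc (n k : Nat) (ids : List Int) (hAC : pvAC n k ids) : pvAC n (k+1) ids := by
  intro x hx
  have h := hAC x hx
  rw [Function.iterate_succ_apply', h, h]

theorem pvCardCongr (n : Nat) (ids ids' : List Int)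
    (h : ∀ y, y < n → pvRoot n ids' y = pvRoot n ids y) (x : Nat) (hx : x < n) :
    pvCard n ids' x = pvCard n ids x := by
  unfold pvCard
  apply List.countP_congr
  intro y hy
  rw [List.mem_range] at hy
  rw [h y hy, h x hx]

theorem pvMergeSpec (n k : Nat) (idsOld ids2 sizes labels : List Int)
    (members : List (List Int)) (xs xd : Nat) (hxs : xs < n) (hxd : xd < n)
    (hRG2 : pvRG n ids2) (hAC2 : pvAC n k ids2) (hk1 : k + 1 ≤ n)
    (hRootsC : ∀ y, y < n → pvRoot n ids2 y = pvRoot n idsOld y)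
    (hszlen : sizes.length = n)
    (hSZ : ∀ x, x < n → sizes.getD (pvRoot n idsOld x) 0 = (pvCard n idsOld x : Int))
    (hLB : pvLB n labels) (hMEM : pvMEM n labels members) (hCP : pvCP n idsOld labels)
    (hne : pvRoot n idsOld xs ≠ pvRoot n idsOld xd) :
    pvINV n (k+1)
      (ids2.set (pvRoot n idsOld xs) ((pvRoot n idsOld xd : Nat) : Int),
       sizes.set (pvRoot n idsOld xd)
         ((pvCard n idsOld xd : Int) + (pvCard n idsOld xs : Int)))
      ((members.getD (labels.getD xs 0).toNat []).foldl
          (fun ls x => PySem.List.pySetD ls x (labels.getD xd 0)) labels,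
       (members.set (labels.getD xd 0).toNat
          (members.getD (labels.getD xd 0).toNat [] ++ members.getD (labels.getD xs 0).toNat [])).set
         (labels.getD xs 0).toNat []) := by
  set R : Nat → Nat := pvRoot n idsOld with hR
  set RS := R xs with hRS
  set RD := R xd with hRD
  have hRSn : RS < n := by rw [hRS, ← hRootsC xs hxs]; exact pvRootLt n ids2 hRG2 xs hxs
  have hRDn : RD < n := by rw [hRD, ← hRootsC xd hxd]; exact pvRootLt n ids2 hRG2 xd hxd
  set LS := labels.getD xs 0 with hLS
  set LD := labels.getD xd 0 with hLD
  have hLSn : LS.toNat < n := (hLB.2 xs hxs).2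
  have hLDn : LD.toNat < n := (hLB.2 xd hxd).2
  have hLScast : LS = ((LS.toNat : Nat) : Int) := (Int.toNat_of_nonneg (hLB.2 xs hxs).1).symm
  have hLDcast : LD = ((LD.toNat : Nat) : Int) := (Int.toNat_of_nonneg (hLB.2 xd hxd).1).symm
  have hRlab : ∀ z, z < n → (R z = RS ↔ labels.getD z 0 = LS) := fun z hz => hCP z hz xs hxs
  have hRlabD : ∀ z, z < n → (R z = RD ↔ labels.getD z 0 = LD) := fun z hz => hCP z hz xd hxd
  have hLne : LS ≠ LD := fun h => hne ((hCP xs hxs xd hxd).2 h)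
  have hlen2 : ids2.length = n := hRG2.1
  have hmlen : members.length = n := hMEM.1
  have hlablen : labels.length = n := hLB.1
  -- ===== A side =====
  set ids3 := ids2.set RS ((RD : Nat) : Int) with hids3
  have hP3 : pvP ids3 = Function.update (pvP ids2) RS RD := by
    rw [hids3, pvP_set ids2 RS (hlen2 ▸ hRSn) _ (by positivity)]
    simp
  have hfixS : pvP ids2 RS = RS := by
    have h := pvRootFix n k ids2 hAC2 (by omega) xs hxs
    rw [hRootsC xs hxs] at h; exact h
  have hfixD : pvP ids2 RD = RD := by
    have h := pvRootFix n k ids2 hAC2 (by omega) xd hxd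
    rw [hRootsC xd hxd] at h; exact h
  obtain ⟨hAC3', hRootF⟩ := pvLink n k (pvP ids2) RS RD hfixS hfixD hne hAC2 hk1
  rw [← hP3] at hAC3' hRootF
  have hRoot3 : ∀ x, x < n → pvRoot n ids3 x = if R x = RS then RD else R x := by
    intro x hx
    show (pvP ids3)^[n] x = _
    rw [hRootF x hx]
    have h2 : (pvP ids2)^[n] x = R x := hRootsC x hx
    rw [h2]
  have hRG3 : pvRG n ids3 := by
    refine ⟨by rw [hids3, List.length_set, hlen2], fun y hy => ?_⟩
    rw [hids3, pvGetDSet ids2 RS (hlen2 ▸ hRSn) _ y]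
    by_cases hyRS : y = RS
    · rw [if_pos hyRS]
      refine ⟨by positivity, by simpa using hRDn⟩
    · rw [if_neg hyRS]; exact hRG2.2 y hy
  set CS := pvCard n idsOld xs with hCS
  set CD := pvCard n idsOld xd with hCD
  have hCSeq : (List.range n).countP (fun y => R y == RS) = CS := rfl
  have hCDeq : (List.range n).countP (fun y => R y == RD) = CD := rfl
  have hcard3 : ∀ x, x < n →
      pvCard n ids3 x = (if R x = RS ∨ R x = RD then CD + CS else pvCard n idsOld x) := by
    intro x hx
    by_cases hx1 : R x = RS ∨ R x = RD
    · rw [if_pos hx1]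
      have hr3x : pvRoot n ids3 x = RD := by
        rw [hRoot3 x hx]
        rcases hx1 with h | h
        · rw [if_pos h]
        · rw [if_neg (by rw [h]; exact fun hh => hne hh.symm), h]
      unfold pvCard
      rw [hr3x]
      have hcongr : (List.range n).countP (fun y => pvRoot n ids3 y == RD)
          = (List.range n).countP (fun y => (R y == RS) || (R y == RD)) := by
        apply List.countP_congr
        intro y hy
        rw [List.mem_range] at hy
        rw [hRoot3 y hy]
        by_cases h1 : R y = RS
        · simp [h1]
        · simp [h1]
      rw [hcongr, pvCountSplit _ _ _ (fun a _ => by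
          rintro ⟨h1, h2⟩
          rw [beq_iff_eq] at h1 h2
          exact hne (h1 ▸ h2 ▸ rfl)), hCSeq, hCDeq]
      omega
    · rw [if_neg hx1]
      have hx1' := hx1
      push_neg at hx1'
      have hr3x : pvRoot n ids3 x = R x := by rw [hRoot3 x hx, if_neg hx1'.1]
      unfold pvCard
      rw [hr3x]
      apply List.countP_congr
      intro y hy
      rw [List.mem_range] at hy
      rw [hRoot3 y hy]
      by_cases h1 : R y = RS
      · rw [if_pos h1]
        have h2 : RD ≠ R x := fun h => hx1'.2 h.symm
        have h3 : R y ≠ R x := by rw [h1]; exact fun h => hx1'.1 h.symm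
        rw [beq_eq_false_iff_ne.mpr h2, beq_eq_false_iff_ne.mpr h3]
      · rw [if_neg h1]
  have hSZ3 : ∀ x, x < n →
      (sizes.set RD ((CD : Int) + (CS : Int))).getD (pvRoot n ids3 x) 0
        = (pvCard n ids3 x : Int) := by
    intro x hx
    rw [hcard3 x hx]
    by_cases hx1 : R x = RS ∨ R x = RD
    · have hr3x : pvRoot n ids3 x = RD := by
        rw [hRoot3 x hx]
        rcases hx1 with h | h
        · rw [if_pos h]
        · rw [if_neg (by rw [h]; exact fun hh => hne hh.symm), h]
      rw [hr3x, pvGetDSet sizes RD (hszlen ▸ hRDn) _ RD, if_pos rfl, if_pos hx1]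
      push_cast; ring
    · have hx1' := hx1
      push_neg at hx1'
      have hr3x : pvRoot n ids3 x = R x := by rw [hRoot3 x hx, if_neg hx1'.1]
      rw [hr3x, pvGetDSet sizes RD (hszlen ▸ hRDn) _ (R x),
        if_neg (fun h => hx1'.2 h), if_neg hx1]
      exact hSZ x hx
  -- ===== B side =====
  have hmemLS : ∀ z : Int, z ∈ members.getD LS.toNat [] ↔
      ∃ x, x < n ∧ z = (x : Int) ∧ labels.getD x 0 = LS := by
    intro z
    rw [(hMEM.2 _ hLSn).2 z]
    constructor
    · rintro ⟨x, hx, rfl, hl⟩; exact ⟨x, hx, rfl, by rw [hl]; exact hLScast.symm⟩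
    · rintro ⟨x, hx, rfl, hl⟩; exact ⟨x, hx, rfl, by rw [hl]; exact hLScast⟩
  have hmemLD : ∀ z : Int, z ∈ members.getD LD.toNat [] ↔
      ∃ x, x < n ∧ z = (x : Int) ∧ labels.getD x 0 = LD := by
    intro z
    rw [(hMEM.2 _ hLDn).2 z]
    constructor
    · rintro ⟨x, hx, rfl, hl⟩; exact ⟨x, hx, rfl, by rw [hl]; exact hLDcast.symm⟩
    · rintro ⟨x, hx, rfl, hl⟩; exact ⟨x, hx, rfl, by rw [hl]; exact hLDcast⟩
  obtain ⟨hlab3len, hlab3⟩ := pvRelabel n LD (members.getD LS.toNat []) labels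
      (fun z hz => by
        obtain ⟨x, hx, hzx, _⟩ := (hmemLS z).1 hz
        exact ⟨x, hx, hzx⟩) hlablen
  set labels3 := (members.getD LS.toNat []).foldl
      (fun ls x => PySem.List.pySetD ls x LD) labels with hlabels3
  have hmemLSx : ∀ x : Nat, x < n →
      (((x : Nat) : Int) ∈ members.getD LS.toNat [] ↔ labels.getD x 0 = LS) := by
    intro x hx
    rw [hmemLS]
    constructor
    · rintro ⟨x', hx', hxx', hl⟩
      have : x = x' := by exact_mod_cast hxx'
      subst this; exact hl
    · intro h; exact ⟨x, hx, rfl, h⟩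
  have hLab3 : ∀ x, x < n →
      labels3.getD x 0 = if labels.getD x 0 = LS then LD else labels.getD x 0 := by
    intro x hx
    rw [hlabels3, hlab3 x hx]
    by_cases h : labels.getD x 0 = LS
    · rw [if_pos ((hmemLSx x hx).2 h), if_pos h]
    · rw [if_neg (fun hm => h ((hmemLSx x hx).1 hm)), if_neg h]
  have hLB3 : pvLB n labels3 := by
    refine ⟨hlab3len, fun x hx => ?_⟩
    rw [hLab3 x hx]
    by_cases h : labels.getD x 0 = LS
    · rw [if_pos h]; exact hLB.2 xd hxd
    · rw [if_neg h]; exact hLB.2 x hx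
  set members3 := (members.set LD.toNat
      (members.getD LD.toNat [] ++ members.getD LS.toNat [])).set LS.toNat [] with hm3
  have hm3get : ∀ l, l < n → members3.getD l [] =
      if l = LS.toNat then []
      else if l = LD.toNat then members.getD LD.toNat [] ++ members.getD LS.toNat []
      else members.getD l [] := by
    intro l hl
    rw [hm3, pvGetDSetL _ LS.toNat (by rw [List.length_set, hmlen]; exact hLSn) _ l]
    by_cases h1 : l = LS.toNat
    · rw [if_pos h1, if_pos h1]
    · rw [if_neg h1, if_neg h1, pvGetDSetL members LD.toNat (hmlen ▸ hLDn) _ l]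
  have hLDSne : LD.toNat ≠ LS.toNat := fun h => hLne (by rw [hLScast, hLDcast, h])
  have hMEM3 : pvMEM n labels3 members3 := by
    refine ⟨by rw [hm3, List.length_set, List.length_set, hmlen], fun l hl => ?_⟩
    rw [hm3get l hl]
    by_cases h1 : l = LS.toNat
    · subst h1
      rw [if_pos rfl]
      refine ⟨by simp, fun z => ?_⟩
      simp only [List.not_mem_nil, false_iff]
      rintro ⟨x, hx, rfl, hl3⟩
      rw [hLab3 x hx] at hl3
      by_cases h : labels.getD x 0 = LS
      · rw [if_pos h, ← hLScast] at hl3; exact hLne hl3.symm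
      · rw [if_neg h, ← hLScast] at hl3; exact h hl3
    · rw [if_neg h1]
      by_cases h2 : l = LD.toNat
      · subst h2
        rw [if_pos rfl]
        constructor
        · refine List.Nodup.append (hMEM.2 _ hLDn).1 (hMEM.2 _ hLSn).1 ?_
          intro z hzD hzS
          obtain ⟨x, hx, rfl, hlx⟩ := (hmemLD z).1 hzD
          obtain ⟨x', hx', hxx, hlx'⟩ := (hmemLS _).1 hzS
          have : x = x' := by exact_mod_cast hxx
          subst this
          exact hLne (by rw [← hlx, hlx'])
        · intro z
          rw [List.mem_append, hmemLD z, hmemLS z]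
          constructor
          · rintro (⟨x, hx, rfl, hlx⟩ | ⟨x, hx, rfl, hlx⟩)
            · refine ⟨x, hx, rfl, ?_⟩
              rw [hLab3 x hx, if_neg (by rw [hlx]; exact Ne.symm hLne), hlx, hLDcast]
              simp
            · refine ⟨x, hx, rfl, ?_⟩
              rw [hLab3 x hx, if_pos hlx, hLDcast]
              simp
          · rintro ⟨x, hx, rfl, hl3⟩
            rw [hLab3 x hx] at hl3
            by_cases h : labels.getD x 0 = LS
            · exact Or.inr ⟨x, hx, rfl, h⟩
            · rw [if_neg h, ← hLDcast] at hl3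
              exact Or.inl ⟨x, hx, rfl, hl3⟩
      · rw [if_neg h2]
        refine ⟨(hMEM.2 l hl).1, fun z => ?_⟩
        rw [(hMEM.2 l hl).2 z]
        have hlLS : ((l : Nat) : Int) ≠ LS := by
          rw [hLScast]; exact_mod_cast fun h => h1 (by exact_mod_cast h)
        have hlLD : ((l : Nat) : Int) ≠ LD := by
          rw [hLDcast]; exact_mod_cast fun h => h2 (by exact_mod_cast h)
        constructor
        · rintro ⟨x, hx, rfl, hlx⟩
          refine ⟨x, hx, rfl, ?_⟩
          rw [hLab3 x hx, if_neg (by rw [hlx]; exact hlLS), hlx]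
        · rintro ⟨x, hx, rfl, hl3⟩
          rw [hLab3 x hx] at hl3
          by_cases h : labels.getD x 0 = LS
          · rw [if_pos h] at hl3; exact absurd hl3.symm hlLD
          · rw [if_neg h] at hl3; exact ⟨x, hx, rfl, hl3⟩
  have hCP3 : ∀ x, x < n → ∀ y, y < n →
      (pvRoot n ids3 x = pvRoot n ids3 y ↔ labels3.getD x 0 = labels3.getD y 0) := by
    intro x hx y hy
    rw [hRoot3 x hx, hRoot3 y hy, hLab3 x hx, hLab3 y hy]
    by_cases h1 : labels.getD x 0 = LS <;> by_cases h2 : labels.getD y 0 = LS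
    · have hx1 : R x = RS := (hRlab x hx).2 h1
      have hy1 : R y = RS := (hRlab y hy).2 h2
      rw [if_pos hx1, if_pos hy1, if_pos h1, if_pos h2]
      simp
    · have hx1 : R x = RS := (hRlab x hx).2 h1
      have hy1 : R y ≠ RS := fun h => h2 ((hRlab y hy).1 h)
      rw [if_pos h1, if_pos hx1, if_neg h2, if_neg hy1]
      constructor
      · intro h; exact ((hRlabD y hy).1 h.symm).symm
      · intro h; exact ((hRlabD y hy).2 h.symm).symm
    · have hy1 : R y = RS := (hRlab y hy).2 h2
      have hx1 : R x ≠ RS := fun h => h1 ((hRlab x hx).1 h)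
      rw [if_neg h1, if_pos h2, if_pos hy1, if_neg hx1]
      constructor
      · intro h; exact (hRlabD x hx).1 h
      · intro h; exact (hRlabD x hx).2 h
    · have hx1 : R x ≠ RS := fun h => h1 ((hRlab x hx).1 h)
      have hy1 : R y ≠ RS := fun h => h2 ((hRlab y hy).1 h)
      rw [if_neg h1, if_neg h2, if_neg hx1, if_neg hy1]
      exact hCP x hx y hy
  exact ⟨hRG3, hAC3', by rw [List.length_set, hszlen], hSZ3, hLB3, hMEM3, hCP3⟩

theorem pvUnionSpec (n k : Nat) (st : List Int × List Int) (bst : List Int × List (List Int))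
    (hk : k < n) (hINV : pvINV n k st bst) (v : Int) (hlo : 1 - (n:Int) ≤ v) (hhi : v ≤ n) :
    pvINV n (k+1) (ufUnion st ((k:Nat) : Int) (v - 1) (n+1)) (qfStep n bst (((k:Nat) : Int), v)) := by
  obtain ⟨hRG, hAC, hszlen, hSZ, hLB, hMEM, hCP⟩ := hINV
  have hkn : k ≤ n := le_of_lt hk
  have hkI : ((k:Nat):Int) < (n:Int) := by exact_mod_cast hk
  have hnI : 0 < (n:Int) := by omega
  set j : Nat := (PySem.Int.mod (v - 1) (n:Int)).toNat with hj
  have hmlt := PySem.Int.mod_lt (a := v - 1) (b := (n:Int)) hnI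
  have hmnn := PySem.Int.mod_nonneg (a := v - 1) (b := (n:Int)) hnI
  have hjn : j < n := by omega
  have hjcast : PySem.Int.mod (v - 1) (n:Int) = ((j : Nat) : Int) := by rw [hj]; omega
  have hmodk : (PySem.Int.mod ((k:Nat):Int) (n:Int)).toNat = k := by
    rw [PySem.Int.mod_eq_emod_of_pos hnI, Int.emod_eq_of_lt (by positivity) hkI]
    simp
  obtain ⟨ids1, hrun1, hRG1, hAC1, hRoots1⟩ :=
    pvRootCall n k st.1 ((k:Nat):Int) (by omega) hkI hRG hkn hAC
  obtain ⟨ids2, hrun2, hRG2, hAC2, hRoots2⟩ :=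
    pvRootCall n k ids1 (v - 1) (by omega) (by omega) hRG1 hkn hAC1
  rw [hmodk] at hrun1
  have hRB1 : pvRoot n ids1 (PySem.Int.mod (v-1) (n:Int)).toNat = pvRoot n st.1 j := by
    rw [hjcast]; simp only [Int.toNat_natCast]; exact hRoots1 j hjn
  rw [hRB1] at hrun2
  set RA := pvRoot n st.1 k with hRA
  set RB := pvRoot n st.1 j with hRB
  have hRootsC : ∀ y, y < n → pvRoot n ids2 y = pvRoot n st.1 y := by
    intro y hy; rw [hRoots2 y hy, hRoots1 y hy]
  have hRAn : RA < n := pvRootLt n st.1 hRG k hk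
  have hRBn : RB < n := pvRootLt n st.1 hRG j hjn
  set CA := pvCard n st.1 k with hCA
  set CB := pvCard n st.1 j with hCB
  have hsa : st.2.getD RA 0 = ((CA : Nat) : Int) := hSZ k hk
  have hsb : st.2.getD RB 0 = ((CB : Nat) : Int) := hSZ j hjn
  set lan := (bst.1.getD k 0).toNat with hlan
  set lbn := (bst.1.getD j 0).toNat with hlbn
  have hlann : lan < n := (hLB.2 k hk).2
  have hlbnn : lbn < n := (hLB.2 j hjn).2
  have hlacast : bst.1.getD k 0 = ((lan : Nat) : Int) :=
    (Int.toNat_of_nonneg (hLB.2 k hk).1).symm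
  have hlbcast : bst.1.getD j 0 = ((lbn : Nat) : Int) :=
    (Int.toNat_of_nonneg (hLB.2 j hjn).1).symm
  have hlenA : (bst.2.getD lan []).length = CA := pvLenMem n st.1 bst.1 bst.2 hLB hMEM hCP k hk
  have hlenB : (bst.2.getD lbn []).length = CB := pvLenMem n st.1 bst.1 bst.2 hLB hMEM hCP j hjn
  have hCPkj : (RA = RB ↔ bst.1.getD k 0 = bst.1.getD j 0) := hCP k hk j hjn
  -- reduce both step functions
  simp only [ufUnion, qfStep, hrun1, hrun2, hjcast, PySem.List.pyGetD_natCast]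
  by_cases heq : RA = RB
  · have heqI : ((RA:Nat):Int) = ((RB:Nat):Int) := by exact_mod_cast heq
    have heqL : bst.1.getD k 0 = bst.1.getD j 0 := hCPkj.1 heq
    rw [if_pos heqI, if_pos heqL]
    refine ⟨hRG2, pvACsucc n k ids2 hAC2, hszlen, ?_, hLB, hMEM, ?_⟩
    · intro x hx
      show st.2.getD (pvRoot n ids2 x) 0 = _
      rw [hRootsC x hx, pvCardCongr n st.1 ids2 hRootsC x hx]
      exact hSZ x hx
    · intro x hx y hy
      show pvRoot n ids2 x = pvRoot n ids2 y ↔ _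
      rw [hRootsC x hx, hRootsC y hy]
      exact hCP x hx y hy
  · have hneI : ((RA:Nat):Int) ≠ ((RB:Nat):Int) := by exact_mod_cast heq
    have hneL : bst.1.getD k 0 ≠ bst.1.getD j 0 := fun h => heq (hCPkj.2 h)
    rw [if_neg hneI, if_neg hneL]
    -- rewrite the member-list reads
    rw [hlacast, hlbcast]
    simp only [PySem.List.pyGetD_natCast]
    rw [← hlacast, ← hlbcast]
    rw [hsa, hsb]
    by_cases hgt : CB < CA
    · have hgtI : ((CB:Nat):Int) < ((CA:Nat):Int) := by exact_mod_cast hgt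
      have hgtL : (bst.2.getD lbn []).length < (bst.2.getD lan []).length := by
        rw [hlenA, hlenB]; exact hgt
      rw [if_pos hgtI, if_pos hgtL]
      have hms := pvMergeSpec n k st.1 ids2 st.2 bst.1 bst.2 j k hjn hk hRG2 hAC2
        (by omega) hRootsC hszlen hSZ hLB hMEM hCP (Ne.symm heq)
      rw [hlacast, hlbcast] at hms ⊢
      simp only [PySem.List.pyGetD_natCast, PySem.List.pySetD_natCast,
        Int.toNat_natCast] at hms ⊢
      exact hms
    · have hgtI : ¬ (((CB:Nat):Int) < ((CA:Nat):Int)) := by exact_mod_cast hgt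
      have hgtL : ¬ ((bst.2.getD lbn []).length < (bst.2.getD lan []).length) := by
        rw [hlenA, hlenB]; exact hgt
      rw [if_neg hgtI, if_neg hgtL]
      have hms := pvMergeSpec n k st.1 ids2 st.2 bst.1 bst.2 k j hk hjn hRG2 hAC2
        (by omega) hRootsC hszlen hSZ hLB hMEM hCP heq
      rw [hlacast, hlbcast] at hms ⊢
      simp only [PySem.List.pyGetD_natCast, PySem.List.pySetD_natCast,
        Int.toNat_natCast] at hms ⊢
      exact hms

-- ---- the two main loops ----
theorem pvLoop1 (bh : List Int) (hpre : Pre_FindSignatureCountsUF bh) (_hn : 0 < bh.length) :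
    ∀ m, m ≤ bh.length →
    pvINV bh.length m
      ((List.range m).foldl
        (fun (st : List Int × List Int) i =>
          ufUnion st (Int.ofNat i) (PySem.List.pyGetD bh (Int.ofNat i) 0 - 1) (bh.length+1))
        ((List.range bh.length).map Int.ofNat, List.replicate bh.length (1 : Int)))
      ((List.range m).foldl
        (fun (bst : List Int × List (List Int)) (i : Nat) => qfStep bh.length bst ((i : Int), PySem.List.pyGetD bh (i : Int) 0))
        ((List.range bh.length).map Int.ofNat, (List.range bh.length).map (fun i => [(Int.ofNat i : Int)]))) := by
  set n := bh.length with hn'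
  intro m
  induction m with
  | zero =>
    intro _
    simp only [List.range_zero, List.foldl_nil]
    unfold pvINV
    dsimp only
    have hgetIds : ∀ x : Nat, x < n →
        ((List.range n).map Int.ofNat).getD x 0 = ((x : Nat) : Int) := by
      intro x hx
      rw [show (Int.ofNat : Nat → Int) = (fun i : Nat => ((i : Nat) : Int)) by
          funext i; simp [Int.ofNat_eq_natCast]]
      exact PySem.List.getD_map_range _ n x 0 hx
    have hpid : ∀ x : Nat, x < n → pvP ((List.range n).map Int.ofNat) x = x := by
      intro x hx
      show (((List.range n).map Int.ofNat).getD x 0).toNat = x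
      rw [hgetIds x hx]; simp
    have hroot : ∀ x : Nat, x < n → pvRoot n ((List.range n).map Int.ofNat) x = x := by
      intro x hx
      show (pvP ((List.range n).map Int.ofNat))^[n] x = x
      have : pvP ((List.range n).map Int.ofNat) x = x := hpid x hx
      exact Function.iterate_fixed this n
    have hcard1 : ∀ x : Nat, x < n → pvCard n ((List.range n).map Int.ofNat) x = 1 := by
      intro x hx
      unfold pvCard
      have hc : (List.range n).countP
          (fun y => pvRoot n ((List.range n).map Int.ofNat) y == pvRoot n ((List.range n).map Int.ofNat) x)
          = (List.range n).countP (fun y => y == x) := by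
        apply List.countP_congr
        intro y hy
        rw [List.mem_range] at hy
        rw [hroot y hy, hroot x hx]
      rw [hc]
      have : (List.range n).countP (fun y => y == x) = List.count x (List.range n) := by
        simp [List.count]
      rw [this, List.count_range, if_pos hx]
    refine ⟨⟨by simp, fun x hx => ?_⟩, fun x hx => by
        simp only [Function.iterate_zero, id_eq]; exact hpid x hx, by simp,
      fun x hx => ?_, ⟨by simp, fun x hx => ?_⟩, ⟨by simp, fun l hl => ?_⟩, fun x hx y hy => ?_⟩
    · rw [hgetIds x hx]; constructor
      · positivity
      · simpa using hx
    · show (List.replicate n (1:Int)).getD (pvRoot n ((List.range n).map Int.ofNat) x) 0 = _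
      rw [hroot x hx, List.getD_replicate 1 hx, hcard1 x hx]
      simp
    · rw [hgetIds x hx]; constructor
      · positivity
      · simpa using hx
    · rw [PySem.List.getD_map_range _ n l ([] : List Int) hl]
      refine ⟨by simp, fun z => ?_⟩
      simp only [List.mem_singleton]
      constructor
      · rintro rfl
        exact ⟨l, hl, by simp [Int.ofNat_eq_natCast], by rw [hgetIds l hl]⟩
      · rintro ⟨x, hx, rfl, hlab⟩
        rw [hgetIds x hx] at hlab
        have hxl : x = l := by exact_mod_cast hlab
        rw [hxl]; simp [Int.ofNat_eq_natCast]
    · rw [hroot x hx, hroot y hy, hgetIds x hx, hgetIds y hy]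
      constructor
      · intro h; exact_mod_cast h
      · intro h; exact_mod_cast h
  | succ m ih =>
    intro hm1
    have hm : m ≤ n := by omega
    have hINV := ih hm
    rw [List.range_succ, List.foldl_append, List.foldl_append]
    simp only [List.foldl_cons, List.foldl_nil]
    have hvmem : bh.getD m 0 ∈ bh := by
      have : bh.getD m 0 = bh[m]'(by omega) := List.getD_eq_getElem bh 0 (by omega)
      rw [this]; exact List.getElem_mem _
    obtain ⟨hv1, hv2⟩ := hpre _ hvmem
    have hstep := pvUnionSpec n m _ _ (by omega) hINV (bh.getD m 0) hv1 hv2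
    have hco : (Int.ofNat m : Int) = ((m:Nat) : Int) := by simp [Int.ofNat_eq_natCast]
    rw [hco, PySem.List.pyGetD_natCast]
    exact hstep

theorem pvLoop2 (n : Nat) (szF : List Int) (R : Nat → Nat) :
    ∀ (l : List Nat) (ids : List Int) (acc : List Int), (∀ i ∈ l, i < n) →
    pvRG n ids → pvAC n n ids → (∀ x, x < n → pvRoot n ids x = R x) →
    (l.foldl (fun (acc2 : List Int × List Int) i =>
        let r := ufRoot acc2.1 (Int.ofNat i) (n+1)
        (r.1, acc2.2 ++ [PySem.List.pyGetD szF r.2 0])) (ids, acc)).2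
      = acc ++ l.map (fun i => PySem.List.pyGetD szF ((R i : Nat) : Int) 0) := by
  intro l
  induction l with
  | nil => intro ids acc _ _ _ _; simp
  | cons i t iht =>
    intro ids acc hmem hRG hAC hR
    have hin : i < n := hmem i (by simp)
    have hnI : (0:Int) < n := by
      have : ((i:Nat):Int) < n := by exact_mod_cast hin
      omega
    obtain ⟨ids', hrun, hRG', hAC', hRoots'⟩ :=
      pvRootCall n n ids ((i:Nat):Int) (by omega) (by exact_mod_cast hin) hRG le_rfl hAC
    have hmodi : (PySem.Int.mod ((i:Nat):Int) (n:Int)).toNat = i := by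
      rw [PySem.Int.mod_eq_emod_of_pos hnI,
        Int.emod_eq_of_lt (by positivity) (by exact_mod_cast hin)]
      simp
    rw [hmodi] at hrun
    rw [List.foldl_cons]
    have hco : (Int.ofNat i : Int) = ((i:Nat) : Int) := by simp [Int.ofNat_eq_natCast]
    rw [hco, hrun]
    simp only []
    rw [iht ids' (acc ++ [PySem.List.pyGetD szF ((pvRoot n ids i : Nat) : Int) 0])
      (fun x hx => hmem x (by simp [hx])) hRG' hAC'
      (fun x hx => by rw [hRoots' x hx]; exact hR x hx)]
    rw [hR i hin]
    simp

theorem pvMain (bh : List Int) (hpre : Pre_FindSignatureCountsUF bh) :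
    FindSignatureCountsUF bh = FindSignatureCountsUF_alt bh := by
  by_cases h0 : bh = []
  · subst h0; rfl
  · have hn : 0 < bh.length := List.length_pos_iff.2 h0
    obtain ⟨hRGF, hACF, hszlenF, hSZF, hLBF, hMEMF, hCPF⟩ :=
      pvLoop1 bh hpre hn bh.length le_rfl
    simp only [FindSignatureCountsUF, FindSignatureCountsUF_alt]
    set n := bh.length with hn'
    set stF := (List.range n).foldl
        (fun (st : List Int × List Int) i =>
          ufUnion st (Int.ofNat i) (PySem.List.pyGetD bh (Int.ofNat i) 0 - 1) (n+1))
        ((List.range n).map Int.ofNat, List.replicate n (1 : Int)) with hstF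
    set bstF := (List.range n).foldl
        (fun (bst : List Int × List (List Int)) (i : Nat) =>
          qfStep n bst ((i : Int), PySem.List.pyGetD bh (i : Int) 0))
        ((List.range n).map Int.ofNat, (List.range n).map (fun i => [(Int.ofNat i : Int)])) with hbstF
    -- A's reporting loop
    rw [pvLoop2 n stF.2 (pvRoot n stF.1) (List.range n) stF.1 []
      (fun i hi => List.mem_range.1 hi) hRGF hACF (fun x _ => rfl)]
    -- B's enumerate loop is the same fold over range
    have henum : PySem.List.enumerate bh 0
        = (List.range n).map (fun (k : Nat) => (((k:Nat):Int), PySem.List.pyGetD bh ((k:Nat):Int) 0)) := by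
      rw [PySem.List.enumerate_eq_map_pyRange bh 0, PySem.List.pyRange_one, List.map_map]
      have hlen : ((PySem.List.len bh - 0).toNat) = bh.length := by simp [PySem.List.len_eq]
      rw [hlen]
      apply List.map_congr_left
      intro kk _
      simp [Function.comp, zero_add]
      
    rw [henum, List.foldl_map]
    rw [← hbstF]
    simp only [List.nil_append]
    apply List.map_congr_left
    intro i hi
    have hin : i < n := List.mem_range.1 hi
    have hlan := (hLBF.2 i hin)
    have hlacast : bstF.1.getD i 0 = (((bstF.1.getD i 0).toNat : Nat) : Int) :=
      (Int.toNat_of_nonneg hlan.1).symm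
    have hco : (Int.ofNat i : Int) = ((i:Nat) : Int) := by simp [Int.ofNat_eq_natCast]
    rw [PySem.List.pyGetD_natCast, hSZF i hin, hco, PySem.List.pyGetD_natCast, hlacast,
      PySem.List.pyGetD_natCast]
    rw [pvLenMem n stF.1 bstF.1 bstF.2 hLBF hMEMF hCPF i hin]

-- ===== VERDICT (by name: the statement is the Claim_ definition above) =====
theorem FindSignatureCountsUF_spec : Claim_equal_FindSignatureCountsUF := by
  intro bh _ hpre
  exact pvMain bh hpre
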